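-- pv_equiv track=rewrite | github.com/connormcharg/advent-of-code | 2024/19/solution.py | bar
-- ===== SOURCE A (Python) =====
-- def bar(s, l):
--     cache = {}
--
--     def helper(r):
--         if r in cache:
--             return cache[r]
--
--         if not r:
--             return 1
--
--         c = 0
--         for t in l:
--             if r.startswith(t):
--                 c += helper(r[len(t):])
--
--         cache[r] = c
--         return c
--
--     return helper(s)
-- ===== SOURCE B (Python) =====
-- def bar(s, l):
--     n = len(s)
--     dp = [0] * (n + 1)
--     dp[n] = 1
--     for i in reversed(range(n)):
--         dp[i] = sum(dp[i + len(t)] for t in l if s.startswith(t, i))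
--     return dp[0]
-- ===== Notes on version B (the rewrite author's own statement) =====
-- stated objective: alternative
-- what changed: Replaces the suffix-keyed memoized recursion (dict cache over suffix strings) by an iterative bottom-up DP over positions: an index-keyed table dp[0..n] filled right-to-left with s.startswith(t, i), no recursion, no slicing, no dict.
import Mathlib
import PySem

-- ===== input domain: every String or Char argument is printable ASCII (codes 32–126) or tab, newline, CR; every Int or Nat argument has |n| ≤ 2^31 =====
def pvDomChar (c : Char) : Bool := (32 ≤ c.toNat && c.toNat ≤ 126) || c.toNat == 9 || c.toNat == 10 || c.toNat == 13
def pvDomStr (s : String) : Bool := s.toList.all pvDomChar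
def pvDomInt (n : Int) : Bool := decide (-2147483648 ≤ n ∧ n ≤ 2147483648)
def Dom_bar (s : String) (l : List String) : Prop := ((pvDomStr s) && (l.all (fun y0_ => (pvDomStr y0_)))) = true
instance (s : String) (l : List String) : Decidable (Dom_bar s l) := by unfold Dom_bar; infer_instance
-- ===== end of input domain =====

-- B replaces A's suffix-keyed memoized recursion by an iterative bottom-up index DP (objective: alternative).

-- ===== PORT A =====
-- helper(r) with the memo cache threaded through; the fuel argument only makes the
-- recursion total: under Pre_bar (no empty pattern unless s = "") it never runs out,
-- since every recursive call is on a strictly shorter suffix.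
def barHelper (l : List (List Char)) : Nat → List Char → PySem.Dict (List Char) Int → Int × PySem.Dict (List Char) Int
  | 0, _, cache => (0, cache)
  | fuel+1, r, cache =>
    match cache.get? r with
    | some v => (v, cache)
    | none =>
      if r = [] then (1, cache)
      else
        let p := l.foldl (fun (p : Int × PySem.Dict (List Char) Int) t =>
            if t.isPrefixOf r then
              let q := barHelper l fuel (r.drop t.length) p.2
              (p.1 + q.1, q.2)
            else p) (0, cache)
        (p.1, p.2.insert r p.1)

def bar (s : String) (l : List String) : Int :=
  (barHelper (l.map String.toList) (s.toList.length + 1) s.toList PySem.Dict.empty).1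

-- ===== PORT B =====
-- dp[0..n] filled right-to-left; s.startswith(t, i) for 0 ≤ i ≤ n is exactly
-- t.isPrefixOf (drop i of s's characters).
def bar_alt (s : String) (l : List String) : Int :=
  let cs := s.toList
  let n := cs.length
  let dp0 : List Int := (List.replicate (n+1) 0).set n 1
  let dp := ((List.range n).reverse).foldl (fun dp i =>
      dp.set i ((l.map String.toList).foldl
        (fun acc t => if t.isPrefixOf (cs.drop i) then acc + dp.getD (i + t.length) 0 else acc) 0)) dp0
  dp.getD 0 0

-- ===== PRECONDITION & SPEC =====
-- Pre_ excludes inputs with an empty pattern "" in l and a nonempty s: there A's helper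
-- recurses forever on the unchanged suffix and raises RecursionError (it returns no value).
def Pre_bar (s : String) (l : List String) : Prop := "" ∈ l → s = ""
instance (s : String) (l : List String) : Decidable (Pre_bar s l) := by unfold Pre_bar; infer_instance
def pvWitness_bar : String × List String := ("aab", ["a", "ab", "b"])

def Spec_bar (s : String) (l : List String) (out : Int) : Prop := out = bar_alt s l
instance (s : String) (l : List String) (out : Int) : Decidable (Spec_bar s l out) := by unfold Spec_bar; infer_instance

-- ===== CLAIM (what is proved, stated in full; the proofs are below) =====
def Claim_equal_bar : Prop := ∀ (s : String) (l : List String), Dom_bar s l → Pre_bar s l → Spec_bar s l (bar s l)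

-- ===== LEMMAS AND PROOFS =====

-- Reference count: number of ways to write r as a concatenation of patterns from l
-- (fuel-indexed; stable once fuel exceeds r.length, given no empty pattern).
def pvF (l : List (List Char)) : Nat → List Char → Int
  | 0, _ => 0
  | fuel+1, r =>
    if r = [] then 1
    else (l.map (fun t => if t.isPrefixOf r then pvF l fuel (r.drop t.length) else 0)).sum

lemma pvDropLt {t r : List Char} (hp : t.isPrefixOf r = true) (ht : t ≠ []) :
    (r.drop t.length).length < r.length := by
  have hpre : t <+: r := by rwa [List.isPrefixOf_iff_prefix] at hp
  have hle : t.length ≤ r.length := hpre.length_le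
  have h1 : 1 ≤ t.length := List.length_pos_of_ne_nil ht
  simp only [List.length_drop]; omega

lemma pvF_stable (l : List (List Char)) (H : ∀ t ∈ l, t ≠ []) :
    ∀ f₁ f₂ r, r.length < f₁ → r.length < f₂ → pvF l f₁ r = pvF l f₂ r := by
  intro f₁
  induction f₁ with
  | zero => intro f₂ r h; omega
  | succ f ih =>
    intro f₂ r h1 h2
    cases f₂ with
    | zero => omega
    | succ f' =>
      simp only [pvF]
      by_cases hr : r = []
      · simp [hr]
      · rw [if_neg hr, if_neg hr]
        refine congrArg List.sum (List.map_congr_left ?_)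
        intro t ht
        by_cases hp : t.isPrefixOf r = true
        · rw [if_pos hp, if_pos hp]
          have hlt := pvDropLt hp (H t ht)
          exact ih f' (r.drop t.length) (by omega) (by omega)
        · rw [if_neg hp, if_neg hp]

def pvInv (l : List (List Char)) (c : PySem.Dict (List Char) Int) : Prop :=
  ∀ k v, c.get? k = some v → v = pvF l (k.length + 1) k

lemma pvFold_spec (l : List (List Char)) (H : ∀ t ∈ l, t ≠ []) (fuel : Nat) (r : List Char)
    (IH : ∀ r' cache, r'.length < fuel → pvInv l cache →
      (barHelper l fuel r' cache).1 = pvF l fuel r' ∧ pvInv l (barHelper l fuel r' cache).2) :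
    ∀ (ts : List (List Char)), (∀ t ∈ ts, t ∈ l) → ∀ (a : Int) c, pvInv l c →
      (r.length < fuel + 1) →
      (ts.foldl (fun (p : Int × PySem.Dict (List Char) Int) t =>
            if t.isPrefixOf r then
              let q := barHelper l fuel (r.drop t.length) p.2
              (p.1 + q.1, q.2)
            else p) (a, c)).1
        = a + (ts.map (fun t => if t.isPrefixOf r then pvF l fuel (r.drop t.length) else 0)).sum
      ∧ pvInv l ((ts.foldl (fun (p : Int × PySem.Dict (List Char) Int) t =>
            if t.isPrefixOf r then
              let q := barHelper l fuel (r.drop t.length) p.2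
              (p.1 + q.1, q.2)
            else p) (a, c)).2) := by
  intro ts
  induction ts with
  | nil => intro _ a c hc _; exact ⟨by simp, hc⟩
  | cons t ts iht =>
    intro hmem a c hc hr
    rw [List.foldl_cons, List.map_cons, List.sum_cons]
    by_cases hp : t.isPrefixOf r = true
    · rw [if_pos hp, if_pos hp]
      have ht : t ≠ [] := H t (hmem t (by simp))
      have hlt : (r.drop t.length).length < fuel := by
        have := pvDropLt hp ht; omega
      obtain ⟨hv, hinv⟩ := IH (r.drop t.length) c hlt hc
      obtain ⟨h1, h2⟩ := iht (fun u hu => hmem u (by simp [hu]))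
        (a + (barHelper l fuel (r.drop t.length) c).1)
        (barHelper l fuel (r.drop t.length) c).2 hinv hr
      dsimp only
      refine ⟨?_, h2⟩
      rw [h1, hv]; ring
    · rw [if_neg hp, if_neg hp]
      obtain ⟨h1, h2⟩ := iht (fun u hu => hmem u (by simp [hu])) a c hc hr
      refine ⟨?_, h2⟩
      rw [h1]; ring

lemma pvHelper_spec (l : List (List Char)) (H : ∀ t ∈ l, t ≠ []) :
    ∀ fuel r cache, r.length < fuel → pvInv l cache →
      (barHelper l fuel r cache).1 = pvF l fuel r ∧ pvInv l (barHelper l fuel r cache).2 := by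
  intro fuel
  induction fuel with
  | zero => intro r cache h; omega
  | succ fuel ih =>
    intro r cache hr hc
    simp only [barHelper]
    cases hget : cache.get? r with
    | some v =>
      refine ⟨?_, hc⟩
      rw [hc r v hget]
      exact pvF_stable l H _ _ r (by omega) hr
    | none =>
      by_cases hrne : r = []
      · subst hrne
        rw [if_pos rfl]
        exact ⟨by simp [pvF], hc⟩
      · rw [if_neg hrne]
        obtain ⟨h1, h2⟩ := pvFold_spec l H fuel r ih l (fun _ h => h) 0 cache hc hr
        dsimp only
        constructor
        · rw [h1]
          simp [pvF, hrne]
        · intro k v hkv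
          rw [PySem.Dict.get?_insert] at hkv
          by_cases hk : k = r
          · subst hk
            rw [if_pos rfl] at hkv
            injection hkv with hkv
            have h1' : v = 0 + (l.map (fun t =>
                if t.isPrefixOf k then pvF l fuel (k.drop t.length) else 0)).sum := by
              rw [← hkv]; exact h1
            rw [h1', zero_add]
            have hF : (l.map (fun t => if t.isPrefixOf k then pvF l fuel (k.drop t.length) else 0)).sum
                = pvF l (fuel + 1) k := by
              simp [pvF, hrne]
            rw [hF]
            exact pvF_stable l H _ _ k hr (by omega)
          · rw [if_neg hk] at hkv
            exact h2 k v hkv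

lemma pvInv_empty (l : List (List Char)) : pvInv l PySem.Dict.empty := by
  intro k v h; simp [PySem.Dict.get?_empty] at h

lemma pvBar_eq (s : String) (l : List String) (H : ∀ t ∈ l.map String.toList, t ≠ []) :
    bar s l = pvF (l.map String.toList) (s.toList.length + 1) s.toList := by
  unfold bar
  exact (pvHelper_spec _ H _ _ _ (by omega) (pvInv_empty _)).1

-- sum(… for t in l if cond) as a fold equals a map-sum
lemma pvFoldSum (ts : List (List Char)) (p : List Char → Bool) (f : List Char → Int) :
    ∀ a : Int, ts.foldl (fun acc t => if p t then acc + f t else acc) a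
      = a + (ts.map (fun t => if p t then f t else 0)).sum := by
  induction ts with
  | nil => intro a; simp
  | cons t ts ih =>
    intro a
    rw [List.foldl_cons, List.map_cons, List.sum_cons]
    by_cases hp : p t = true
    · rw [if_pos hp, if_pos hp, ih]; ring
    · rw [if_neg hp, if_neg hp, ih]; ring

lemma pvGetD_set (dp : List Int) (m : Nat) (v : Int) (i : Nat) :
    (dp.set m v).getD i 0 = if m = i ∧ m < dp.length then v else dp.getD i 0 := by
  simp only [List.getD_eq_getElem?_getD, List.getElem?_set]
  by_cases h : m = i
  · subst h
    by_cases hl : m < dp.length <;> simp [hl]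
  · simp [h]

-- the dp loop computes pvF on every suffix
lemma pvLoop_spec (cs : List Char) (dl : List (List Char)) (H : ∀ t ∈ dl, t ≠ []) :
    ∀ (m : Nat), m ≤ cs.length → ∀ (dp : List Int), dp.length = cs.length + 1 →
      (∀ i, m ≤ i → i ≤ cs.length → dp.getD i 0 = pvF dl (cs.length - i + 1) (cs.drop i)) →
      (((List.range m).reverse).foldl (fun dp i =>
          dp.set i (dl.foldl
            (fun acc t => if t.isPrefixOf (cs.drop i) then acc + dp.getD (i + t.length) 0 else acc) 0)) dp).length
        = cs.length + 1
      ∧ ∀ i, i ≤ cs.length →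
        (((List.range m).reverse).foldl (fun dp i =>
          dp.set i (dl.foldl
            (fun acc t => if t.isPrefixOf (cs.drop i) then acc + dp.getD (i + t.length) 0 else acc) 0)) dp).getD i 0
          = pvF dl (cs.length - i + 1) (cs.drop i) := by
  intro m
  induction m with
  | zero =>
    intro _ dp hlen hdp
    simpa using ⟨hlen, fun i hi => hdp i (Nat.zero_le _) hi⟩
  | succ m ih =>
    intro hm dp hlen hdp
    have hrange : (List.range (m+1)).reverse = m :: (List.range m).reverse := by
      rw [List.range_succ, List.reverse_append]; simp
    rw [hrange, List.foldl_cons]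
    have hmn : m < cs.length := by omega
    have hdropne : cs.drop m ≠ [] := by
      intro h
      have := congrArg List.length h
      simp only [List.length_drop, List.length_nil] at this; omega
    have hWm : dl.foldl (fun acc t =>
          if t.isPrefixOf (cs.drop m) then acc + dp.getD (m + t.length) 0 else acc) 0
        = pvF dl (cs.length - m + 1) (cs.drop m) := by
      rw [pvFoldSum, zero_add]
      have hfuel : cs.length - m + 1 = (cs.length - m) + 1 := rfl
      rw [hfuel]
      simp only [pvF, hdropne]
      refine congrArg List.sum (List.map_congr_left ?_)
      intro t ht
      by_cases hp : t.isPrefixOf (cs.drop m) = true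
      · rw [if_pos hp, if_pos hp]
        have ht0 : t ≠ [] := H t ht
        have h1 : 1 ≤ t.length := List.length_pos_of_ne_nil ht0
        have hle : t.length ≤ cs.length - m := by
          have hpre : t <+: cs.drop m := by rwa [List.isPrefixOf_iff_prefix] at hp
          have := hpre.length_le
          simpa only [List.length_drop] using this
        rw [hdp (m + t.length) (by omega) (by omega)]
        rw [List.drop_drop]
        refine pvF_stable dl H _ _ _ ?_ ?_ <;> simp only [List.length_drop] <;> omega
      · rw [if_neg hp, if_neg hp]
    refine ih (by omega) _ (by rw [List.length_set]; exact hlen) ?_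
    intro i him hin
    rw [pvGetD_set]
    by_cases hmi : m = i
    · subst hmi
      rw [if_pos ⟨rfl, by omega⟩]
      exact hWm
    · rw [if_neg (by tauto)]
      exact hdp i (by omega) hin

lemma pvBarAlt_eq (s : String) (l : List String) (H : ∀ t ∈ l.map String.toList, t ≠ []) :
    bar_alt s l = pvF (l.map String.toList) (s.toList.length + 1) s.toList := by
  unfold bar_alt
  obtain ⟨hlen, hall⟩ := pvLoop_spec s.toList (l.map String.toList) H s.toList.length le_rfl
    ((List.replicate (s.toList.length + 1) 0).set s.toList.length 1)
    (by simp)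
    (by
      intro i him hin
      have hi : i = s.toList.length := by omega
      subst hi
      rw [pvGetD_set]
      rw [if_pos ⟨rfl, by simp⟩]
      simp [pvF])
  have := hall 0 (Nat.zero_le _)
  simpa using this

-- ===== VERDICT (by name: the statement is the Claim_ definition above) =====
theorem bar_spec : Claim_equal_bar := by
  unfold Claim_equal_bar
  intro s l _ hpre
  unfold Spec_bar
  by_cases hs : s = ""
  · subst hs
    have hA : bar "" l = 1 := by
      unfold bar
      simp [barHelper, PySem.Dict.get?_empty]
    have hB : bar_alt "" l = 1 := by
      unfold bar_alt
      simp
    rw [hA, hB]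
  · have H : ∀ t ∈ l.map String.toList, t ≠ [] := by
      intro t ht
      simp only [List.mem_map] at ht
      obtain ⟨w, hw, rfl⟩ := ht
      intro h
      exact hs (hpre ((String.toList_eq_nil_iff.mp h) ▸ hw))
    rw [pvBar_eq s l H, pvBarAlt_eq s l H]
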